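-- pv_equiv track=rewrite | github.com/YushaArif99/DCF_experiments | control_flow_experimental/ivy_fx/tests/test_while_loops.py | nested_while
-- ===== SOURCE A (Python) =====
-- def nested_while(n, m):
--     i = 0
--     j = 0
--     count = 0
--     while i < n:
--         while j < m:
--             count += j
--             j += 1
--         i += 1
--     return count
-- ===== SOURCE B (Python) =====
-- def nested_while(n, m):
--     # Closed form: the inner loop runs to completion only on the first outer
--     # iteration (j is never reset), so the total is sum(range(m)) when n > 0.
--     return m * (m - 1) // 2 if n > 0 and m > 0 else 0
-- ===== Notes on version B (the rewrite author's own statement) =====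
-- stated objective: faster
-- what changed: Replaced the nested while loops by the closed form m*(m-1)//2 (the unreset inner loop sums 0..m-1 exactly once when n>0).
import Mathlib
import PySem

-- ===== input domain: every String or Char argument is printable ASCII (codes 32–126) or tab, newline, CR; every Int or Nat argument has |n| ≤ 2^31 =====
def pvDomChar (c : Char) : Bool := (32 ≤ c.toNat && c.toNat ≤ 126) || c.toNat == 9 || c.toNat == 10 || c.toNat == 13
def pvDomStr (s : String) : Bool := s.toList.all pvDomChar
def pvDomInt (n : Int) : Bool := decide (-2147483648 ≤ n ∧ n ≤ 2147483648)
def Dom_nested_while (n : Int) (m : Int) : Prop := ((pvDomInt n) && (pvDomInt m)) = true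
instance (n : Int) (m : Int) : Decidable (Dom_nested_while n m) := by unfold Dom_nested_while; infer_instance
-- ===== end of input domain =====

-- B replaces the two while loops by the closed form m*(m-1)//2 when n>0 and m>0 (faster).

-- ===== PORT A =====
-- inner while loop: while j < m: count += j; j += 1   (returns final (j, count))
def nestedWhileInner (m j count : Int) : Int × Int :=
  if _h : j < m then nestedWhileInner m (j + 1) (count + j) else (j, count)
termination_by (m - j).toNat
decreasing_by omega

-- outer while loop: while i < n: <inner>; i += 1
def nestedWhileOuter (n m i j count : Int) : Int :=
  if _h : i < n then
    let p := nestedWhileInner m j count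
    nestedWhileOuter n m (i + 1) p.1 p.2
  else count
termination_by (n - i).toNat
decreasing_by omega

def nested_while (n : Int) (m : Int) : Int :=
  nestedWhileOuter n m 0 0 0

-- ===== PORT B =====
def nested_while_alt (n : Int) (m : Int) : Int :=
  if 0 < n ∧ 0 < m then PySem.Int.floordiv (m * (m - 1)) 2 else 0

-- ===== PRECONDITION & SPEC =====
def Spec_nested_while (n : Int) (m : Int) (out : Int) : Prop := out = nested_while_alt n m
instance (n : Int) (m : Int) (out : Int) : Decidable (Spec_nested_while n m out) := by unfold Spec_nested_while; infer_instance

-- ===== CLAIM (what is proved, stated in full; the proofs are below) =====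
def Claim_equal_nested_while : Prop := ∀ (n : Int) (m : Int), Dom_nested_while n m → Spec_nested_while n m (nested_while n m)

-- ===== LEMMAS AND PROOFS =====

-- the inner loop leaves (j, count) unchanged when j ≥ m
theorem nestedWhileInner_ge (m j count : Int) (h : m ≤ j) :
    nestedWhileInner m j count = (j, count) := by
  unfold nestedWhileInner
  simp [not_lt.mpr h]

-- the inner loop ends with j = m and adds Σ_{k=j}^{m-1} k to count (stated via 2·Δ)
theorem nestedWhileInner_spec (m : Int) : ∀ j count : Int, j ≤ m →
    (nestedWhileInner m j count).1 = m ∧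
    2 * (nestedWhileInner m j count).2 = 2 * count + m * (m - 1) - j * (j - 1) := by
  intro j count h
  by_cases hlt : j < m
  · have : (m - (j + 1)).toNat < (m - j).toNat := by omega
    unfold nestedWhileInner
    simp only [hlt, dif_pos]
    have ih := nestedWhileInner_spec m (j + 1) (count + j) (by omega)
    refine ⟨ih.1, ?_⟩
    rw [ih.2]; ring
  · have hj : j = m := le_antisymm h (not_lt.mp hlt)
    rw [nestedWhileInner_ge m j count (by omega)]
    subst hj; constructor <;> ring
termination_by j => (m - j).toNat

-- once j ≥ m, further outer iterations change nothing
theorem nestedWhileOuter_ge (n m : Int) : ∀ i j count : Int, m ≤ j →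
    nestedWhileOuter n m i j count = count := by
  intro i j count h
  by_cases hlt : i < n
  · have : (n - (i + 1)).toNat < (n - i).toNat := by omega
    unfold nestedWhileOuter
    simp only [hlt, dif_pos]
    rw [nestedWhileInner_ge m j count h]
    exact nestedWhileOuter_ge n m (i + 1) j count h
  · unfold nestedWhileOuter
    simp [hlt]
termination_by i => (n - i).toNat

theorem nested_while_closed (n m : Int) :
    nested_while n m = nested_while_alt n m := by
  unfold nested_while nested_while_alt
  by_cases hn : 0 < n
  · unfold nestedWhileOuter
    simp only [hn, dif_pos]
    by_cases hm : 0 < m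
    · have hs := nestedWhileInner_spec m 0 0 (by omega)
      rw [nestedWhileOuter_ge n m (0+1) (nestedWhileInner m 0 0).1 (nestedWhileInner m 0 0).2
        (le_of_eq hs.1.symm)]
      have h2 : 2 * (nestedWhileInner m 0 0).2 = m * (m - 1) := by rw [hs.2]; ring
      rw [PySem.Int.floordiv_eq_ediv_of_pos (by omega), ← h2]
      simp [hm, Int.mul_ediv_cancel_left _ (by norm_num : (2:Int) ≠ 0)]
    · rw [nestedWhileInner_ge m 0 0 (by omega),
        nestedWhileOuter_ge n m (0+1) ((0:Int),(0:Int)).1 ((0:Int),(0:Int)).2 (by omega)]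
      simp [hm]
  · unfold nestedWhileOuter
    simp [hn]

-- ===== VERDICT (by name: the statement is the Claim_ definition above) =====
theorem nested_while_spec : Claim_equal_nested_while := by
  intro n m _
  exact nested_while_closed n m
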